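-- pv_equiv track=rewrite | github.com/need-singularity/sylvian-singularity | math/verify_hcross2_shadow_of_p2.py | motzkin
-- ===== SOURCE A (Python) =====
-- def motzkin(n):
--     if n == 0: return 1
--     m = [0] * (n + 1)
--     m[0] = 1
--     m[1] = 1
--     for k in range(2, n + 1):
--         m[k] = m[k-1] + sum(m[j]*m[k-2-j] for j in range(k-1))
--     return m[n]
-- ===== SOURCE B (Python) =====
-- def motzkin(n):
--     # O(n) three-term linear recurrence: (k+2)*M_k = (2k+1)*M_{k-1} + 3*(k-1)*M_{k-2}
--     a, b = 1, 1  # M_{k-2}, M_{k-1}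
--     for k in range(2, n + 1):
--         a, b = b, ((2 * k + 1) * b + 3 * (k - 1) * a) // (k + 2)
--     return b
-- ===== Notes on version B (the rewrite author's own statement) =====
-- stated objective: faster
-- what changed: Replaces the quadratic convolution-table dynamic program by the three-term linear recurrence (k+2)*M_k = (2k+1)*M_{k-1} + 3*(k-1)*M_{k-2} with exact integer division, keeping only two rolling values.
-- outside the precondition, e.g. on motzkin(-1): A raises IndexError, B returns 1
import Mathlib
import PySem

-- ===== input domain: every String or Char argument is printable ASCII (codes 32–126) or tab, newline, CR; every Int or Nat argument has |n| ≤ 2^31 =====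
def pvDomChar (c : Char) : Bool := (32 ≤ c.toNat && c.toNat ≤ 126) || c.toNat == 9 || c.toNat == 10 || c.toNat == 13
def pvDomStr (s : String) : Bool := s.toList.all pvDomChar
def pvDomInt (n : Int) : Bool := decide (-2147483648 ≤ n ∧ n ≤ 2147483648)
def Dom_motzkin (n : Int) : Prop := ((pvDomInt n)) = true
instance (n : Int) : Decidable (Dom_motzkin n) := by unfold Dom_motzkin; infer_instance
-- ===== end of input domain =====

-- B replaces A's O(n^2) convolution table by the three-term linear recurrence
-- (k+2)·M_k = (2k+1)·M_{k-1} + 3(k-1)·M_{k-2}, an O(n) two-variable loop.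

-- ===== PORT A =====
-- Literal port of A; all list indices reached are nonnegative and in range for n ≥ 1
-- (Pre_ excludes n < 0, where Python raises IndexError), so set/getD/toNat are exact.
def motzkin (n : Int) : Int :=
  if n = 0 then 1
  else
    let m0 : List Int := List.replicate (n + 1).toNat 0
    let m1 := (m0.set 0 1).set 1 1
    let mf := (PySem.List.pyRange 2 (n + 1) 1).foldl
      (fun m k =>
        m.set k.toNat ((m.getD (k - 1).toNat 0) +
          (PySem.List.pyRange 0 (k - 1) 1).foldl
            (fun s j => s + (m.getD j.toNat 0) * (m.getD (k - 2 - j).toNat 0)) 0)) m1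
    mf.getD n.toNat 0

-- ===== PORT B =====
def motzkin_alt (n : Int) : Int :=
  ((PySem.List.pyRange 2 (n + 1) 1).foldl
    (fun (p : Int × Int) k =>
      (p.2, PySem.Int.floordiv ((2 * k + 1) * p.2 + 3 * (k - 1) * p.1) (k + 2)))
    (1, 1)).2

-- ===== PRECONDITION & SPEC =====
-- Pre_ excludes exactly the negative inputs, where Python A raises IndexError.
def Pre_motzkin (n : Int) : Prop := 0 ≤ n
instance (n : Int) : Decidable (Pre_motzkin n) := by unfold Pre_motzkin; infer_instance
def pvWitness_motzkin : Int := 5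

def Spec_motzkin (n : Int) (out : Int) : Prop := out = motzkin_alt n
instance (n : Int) (out : Int) : Decidable (Spec_motzkin n out) := by unfold Spec_motzkin; infer_instance

-- ===== CLAIM (what is proved, stated in full; the proofs are below) =====
def Claim_equal_motzkin : Prop := ∀ (n : Int), Dom_motzkin n → Pre_motzkin n → Spec_motzkin n (motzkin n)

-- ===== LEMMAS AND PROOFS =====

def M : ℕ → ℤ
  | 0 => 1
  | 1 => 1
  | n + 2 => M (n + 1) + ∑ j ∈ (Finset.range (n + 1)).attach, M j.1 * M (n - j.1)
decreasing_by
  · omega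
  · have := j.2; simp only [Finset.mem_range] at this; omega
  · omega
theorem M_zero : M 0 = 1 := by rw [M]
theorem M_one : M 1 = 1 := by rw [M]
theorem M_add_two (n : ℕ) :
    M (n + 2) = M (n + 1) + ∑ j ∈ Finset.range (n + 1), M j * M (n - j) := by
  rw [M, Finset.sum_attach (Finset.range (n + 1)) (fun j => M j * M (n - j))]

theorem quadM : (PowerSeries.mk M : PowerSeries ℤ) =
    1 + PowerSeries.X * PowerSeries.mk M + PowerSeries.X ^ 2 * (PowerSeries.mk M) ^ 2 := by
  ext n
  rw [map_add, map_add, PowerSeries.coeff_one, PowerSeries.coeff_X_pow_mul']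
  rcases n with _ | _ | n
  · simp [PowerSeries.coeff_mk, PowerSeries.coeff_zero_X_mul, M_zero]
  · norm_num [PowerSeries.coeff_mk, PowerSeries.coeff_succ_X_mul, M_zero, M_one]
  · rw [if_pos (by omega : 2 ≤ n + 1 + 1), if_neg (by omega : ¬ n + 1 + 1 = 0),
      PowerSeries.coeff_succ_X_mul, PowerSeries.coeff_mk, PowerSeries.coeff_mk,
      show n + 1 + 1 - 2 = n from by omega, pow_two, PowerSeries.coeff_mul,
      Finset.Nat.sum_antidiagonal_eq_sum_range_succ_mk]
    simp only [PowerSeries.coeff_mk]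
    rw [M_add_two]
    ring

theorem dFun_X : (PowerSeries.X : PowerSeries ℤ).derivativeFun = 1 := by
  ext n
  rw [PowerSeries.coeff_derivativeFun, PowerSeries.coeff_one, PowerSeries.coeff_X]
  rcases n with _ | n <;> simp

theorem dquadM : (PowerSeries.mk M : PowerSeries ℤ).derivativeFun =
    PowerSeries.mk M + PowerSeries.X * (PowerSeries.mk M).derivativeFun
      + 2 * (PowerSeries.X * (PowerSeries.mk M) ^ 2)
      + 2 * (PowerSeries.X ^ 2 * (PowerSeries.mk M * (PowerSeries.mk M).derivativeFun)) := by
  have h := congrArg PowerSeries.derivativeFun quadM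
  simp only [pow_two, PowerSeries.derivativeFun_add, PowerSeries.derivativeFun_one,
    PowerSeries.derivativeFun_mul, dFun_X, smul_eq_mul] at h
  linear_combination h

theorem keyM : PowerSeries.X * (PowerSeries.mk M : PowerSeries ℤ).derivativeFun =
    2 * (PowerSeries.X ^ 2 * (PowerSeries.mk M).derivativeFun)
      + 3 * (PowerSeries.X ^ 3 * (PowerSeries.mk M).derivativeFun)
      + 3 * (PowerSeries.X ^ 2 * PowerSeries.mk M)
      + 3 * (PowerSeries.X * PowerSeries.mk M)
      - 2 * PowerSeries.mk M + 2 := by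
  linear_combination (2 + 4 * PowerSeries.X ^ 2 * PowerSeries.mk M + 4 * PowerSeries.X ^ 3 * (PowerSeries.mk M).derivativeFun) * quadM
    + (PowerSeries.X - PowerSeries.X ^ 2 - 2 * PowerSeries.X ^ 3 * PowerSeries.mk M) * dquadM

theorem keyC : PowerSeries.X ^ 1 * (PowerSeries.mk M : PowerSeries ℤ).derivativeFun =
    PowerSeries.C (2 : ℤ) * (PowerSeries.X ^ 2 * (PowerSeries.mk M).derivativeFun)
      + PowerSeries.C (3 : ℤ) * (PowerSeries.X ^ 3 * (PowerSeries.mk M).derivativeFun)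
      + PowerSeries.C (3 : ℤ) * (PowerSeries.X ^ 2 * PowerSeries.mk M)
      + PowerSeries.C (3 : ℤ) * (PowerSeries.X ^ 1 * PowerSeries.mk M)
      - PowerSeries.C (2 : ℤ) * PowerSeries.mk M + PowerSeries.C (2 : ℤ) := by
  simp only [map_ofNat, pow_one]
  exact keyM

theorem M_rec (n : ℕ) :
    ((n : ℤ) + 4) * M (n + 2) = (2 * n + 5) * M (n + 1) + (3 * n + 3) * M n := by
  rcases n with _ | _ | n
  · rw [M_add_two]
    norm_num [M_zero, M_one]
  · rw [M_add_two, M_add_two]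
    norm_num [M_zero, M_one, Finset.sum_range_succ]
  · have h := congrArg (PowerSeries.coeff (n + 4)) keyC
    simp only [map_add, map_sub, PowerSeries.coeff_C_mul, PowerSeries.coeff_C,
      PowerSeries.coeff_X_pow_mul', PowerSeries.coeff_derivativeFun, PowerSeries.coeff_mk] at h
    norm_num at h
    simp only [show n + 4 - 2 = n + 2 from by omega, show n + 4 - 3 = n + 1 from by omega] at h
    push_cast at h ⊢
    linear_combination h

theorem B_loop (N : ℕ) (h : 1 ≤ N) :
    (PySem.List.pyRange 2 ((N : ℤ) + 1) 1).foldl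
      (fun (p : Int × Int) k =>
        (p.2, PySem.Int.floordiv ((2 * k + 1) * p.2 + 3 * (k - 1) * p.1) (k + 2)))
      (1, 1) = (M (N - 1), M N) := by
  induction N with
  | zero => omega
  | succ N ih =>
    rcases Nat.eq_or_lt_of_le h with h1 | h1
    · obtain rfl : N = 0 := by omega
      rw [show ((0+1:ℕ):ℤ) + 1 = 2 from by norm_num,
        PySem.List.pyRange_one_eq_nil (by omega : (2:ℤ) ≤ 2)]
      simp [M_zero, M_one]
    · have hN : 1 ≤ N := by omega
      have hsplit : PySem.List.pyRange 2 ((N:ℤ)+1+1) 1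
          = PySem.List.pyRange 2 ((N:ℤ)+1) 1 ++ [((N:ℤ)+1)] :=
        PySem.List.pyRange_one_succ_right (a := 2) (b := (N:ℤ)+1) (by omega)
      rw [show (((N+1:ℕ)):ℤ) = (N:ℤ)+1 from by push_cast; ring, hsplit, List.foldl_append,
        ih hN]
      simp only [List.foldl_cons, List.foldl_nil]
      have hrec : (2*((N:ℤ)+1)+1) * M N + 3*(((N:ℤ)+1)-1) * M (N-1) = ((N:ℤ)+3) * M (N+1) := by
        have hr := M_rec (N-1)
        rw [show N-1+2 = N+1 from by omega, show N-1+1 = N from by omega] at hr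
        have hc : ((N-1 : ℕ) : ℤ) = (N:ℤ) - 1 := by push_cast [hN]; ring
        rw [hc] at hr
        linarith
      rw [hrec, PySem.Int.floordiv_eq_ediv_of_pos (by omega),
        show ((N:ℤ)+1+2) = (N:ℤ)+3 from by ring,
        Int.mul_ediv_cancel_left (M (N+1)) (show ((N:ℤ)+3) ≠ 0 from by omega)]
      simp

def stepA (m : List Int) (k : Int) : List Int :=
  m.set k.toNat ((m.getD (k - 1).toNat 0) +
    (PySem.List.pyRange 0 (k - 1) 1).foldl
      (fun s j => s + (m.getD j.toNat 0) * (m.getD (k - 2 - j).toNat 0)) 0)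

theorem getD_set_lt (l : List Int) (i : ℕ) (a : Int) (h : i < l.length) :
    (l.set i a).getD i 0 = a := by simp [List.getD, h]

theorem getD_set_ne (l : List Int) (i j : ℕ) (a : Int) (h : i ≠ j) :
    (l.set i a).getD j 0 = l.getD j 0 := by simp [List.getD, List.getElem?_set_ne h]

theorem getD_replicate (m j : ℕ) : (List.replicate m (0:Int)).getD j 0 = 0 := by
  simp [List.getD, List.getElem?_replicate]
  split <;> simp

theorem A_inv (n : ℕ) (hn : 1 ≤ n) (K : ℕ) (hK : 1 ≤ K) (hKn : K ≤ n) :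
    ((PySem.List.pyRange 2 ((K:ℤ)+1) 1).foldl stepA
        (((List.replicate (n+1) (0:Int)).set 0 1).set 1 1)).length = n + 1 ∧
    ∀ j : ℕ, ((PySem.List.pyRange 2 ((K:ℤ)+1) 1).foldl stepA
        (((List.replicate (n+1) (0:Int)).set 0 1).set 1 1)).getD j 0
      = if j ≤ K then M j else 0 := by
  induction K with
  | zero => omega
  | succ K ih =>
    rcases Nat.eq_or_lt_of_le hK with h1 | h1
    · -- K + 1 = 1, i.e. K = 0
      obtain rfl : K = 0 := by omega
      rw [show ((0+1:ℕ):ℤ) + 1 = 2 from by norm_num,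
        PySem.List.pyRange_one_eq_nil (by omega : (2:ℤ) ≤ 2)]
      simp only [List.foldl_nil]
      refine ⟨by simp, fun j => ?_⟩
      rcases j with _ | _ | j
      · rw [getD_set_ne _ 1 0 _ (by omega), getD_set_lt _ 0 _ (by simp)]
        simp [M_zero]
      · rw [getD_set_lt _ 1 _ (by simp; omega)]
        simp [M_one]
      · rw [getD_set_ne _ 1 _ _ (by omega), getD_set_ne _ 0 _ _ (by omega), getD_replicate]
        simp
    · have hK1 : 1 ≤ K := by omega
      obtain ⟨ihlen, ihval⟩ := ih hK1 (by omega)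
      have hsplit : PySem.List.pyRange 2 ((K:ℤ)+1+1) 1
          = PySem.List.pyRange 2 ((K:ℤ)+1) 1 ++ [((K:ℤ)+1)] :=
        PySem.List.pyRange_one_succ_right (a := 2) (b := (K:ℤ)+1) (by omega)
      rw [show (((K+1:ℕ)):ℤ) = (K:ℤ)+1 from by push_cast; ring, hsplit, List.foldl_append]
      set L := (PySem.List.pyRange 2 ((K:ℤ)+1) 1).foldl stepA
        (((List.replicate (n+1) (0:Int)).set 0 1).set 1 1) with hL
      simp only [List.foldl_cons, List.foldl_nil]
      -- the written value is M (K+1)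
      have hval : stepA L ((K:ℤ)+1) = L.set (K+1) (M (K+1)) := by
        unfold stepA
        have e1 : (((K:ℤ)+1) - 1) = (K:ℤ) := by ring
        have e2 : ((K:ℤ)+1).toNat = K + 1 := by omega
        have e3 : ((K:ℤ)).toNat = K := by omega
        rw [e1, e2, e3, PySem.List.pyRange_zero (K:ℤ), PySem.List.foldl_add, List.map_map, e3]
        have hmap : (List.range K).map
            ((fun j => L.getD j.toNat 0 * L.getD (((K:ℤ)+1) - 2 - j).toNat 0) ∘ (fun k : ℕ => (k:ℤ)))
            = (List.range K).map (fun j => M j * M (K - 1 - j)) := by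
          apply List.map_congr_left
          intro j hj
          have hjK : j < K := List.mem_range.mp hj
          have e4 : ((j:ℤ)).toNat = j := by omega
          have e5 : (((K:ℤ)+1) - 2 - (j:ℤ)).toNat = K - 1 - j := by omega
          simp only [Function.comp_apply, e4, e5]
          rw [ihval j, ihval (K - 1 - j), if_pos (by omega), if_pos (by omega)]
        rw [hmap, ihval K, if_pos (le_refl K)]
        congr 1
        have hsum : ((List.range K).map (fun j => M j * M (K - 1 - j))).sum
            = ∑ j ∈ Finset.range K, M j * M (K - 1 - j) := rfl
        rw [zero_add, hsum]
        have := M_add_two (K - 1)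
        rw [show K - 1 + 2 = K + 1 from by omega, show K - 1 + 1 = K from by omega] at this
        rw [this]
      rw [hval]
      constructor
      · rw [List.length_set, ihlen]
      · intro j
        rcases eq_or_ne j (K+1) with rfl | hne
        · rw [getD_set_lt _ _ _ (by omega), if_pos (le_refl _)]
        · rw [getD_set_ne _ _ _ _ (Ne.symm hne), ihval j]
          by_cases hj : j ≤ K
          · rw [if_pos hj, if_pos (by omega)]
          · rw [if_neg hj, if_neg (by omega)]


theorem A_eq_M (n : Int) (h : 0 ≤ n) : motzkin n = M n.toNat := by
  rcases eq_or_lt_of_le h with h0 | h1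
  · rw [motzkin, if_pos h0.symm, ← h0]
    simp [M_zero]
  · have hN : 1 ≤ n.toNat := by omega
    have hcast : ((n.toNat : ℤ)) = n := Int.toNat_of_nonneg h
    obtain ⟨hlen, hval⟩ := A_inv n.toNat hN n.toNat hN (le_refl _)
    rw [motzkin, if_neg (by omega)]
    show ((PySem.List.pyRange 2 (n+1) 1).foldl stepA
      (((List.replicate (n+1).toNat 0).set 0 1).set 1 1)).getD n.toNat 0 = M n.toNat
    rw [show ((n+1).toNat) = n.toNat + 1 from by omega,
      show n + 1 = ((n.toNat:ℤ)) + 1 from by rw [hcast]]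
    rw [hval n.toNat, if_pos (le_refl _)]

theorem B_eq_M (n : Int) (h : 0 ≤ n) : motzkin_alt n = M n.toNat := by
  have hcast : ((n.toNat : ℤ)) = n := Int.toNat_of_nonneg h
  rcases Nat.eq_zero_or_pos n.toNat with h0 | h1
  · rw [motzkin_alt, show n + 1 = 1 from by omega,
      PySem.List.pyRange_one_eq_nil (by omega : (1:ℤ) ≤ 2)]
    rw [h0, M_zero]
    rfl
  · rw [motzkin_alt, show n + 1 = ((n.toNat:ℤ)) + 1 from by rw [hcast],
      B_loop n.toNat h1]

-- ===== VERDICT (by name: the statement is the Claim_ definition above) =====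
theorem motzkin_spec : Claim_equal_motzkin := by
  intro n _ hpre
  unfold Spec_motzkin
  rw [A_eq_M n hpre, B_eq_M n hpre]
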